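-- pv_equiv track=rewrite | github.com/aidanGoesch/NeSyPaperGraph | backend/services/verification.py | get_transitive_synonym_groups
-- ===== SOURCE A (Python) =====
-- from typing import List, Dict, Tuple, Set
--
-- def get_transitive_synonym_groups(topics: List[str], topic_synonyms: Dict[str, List[str]]) -> List[Set[str]]:
--     """Groups topics that must merge due to direct or indirect synonym relationships."""
--     parent = {topic: topic for topic in topics}
--
--     def find(i):
--         if parent[i] == i:
--             return i
--         parent[i] = find(parent[i])
--         return parent[i]
--
--     def union(i, j):
--         root_i = find(i)
--         root_j = find(j)
--         if root_i != root_j: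
--             parent[root_i] = root_j
--
--     # Build the full, symmetrical synonym map
--     full_synonyms = {}
--     for topic_a, syn_list in topic_synonyms.items():
--         if topic_a in topics:
--             full_synonyms.setdefault(topic_a, []).extend(syn_list)
--         for topic_b in syn_list:
--             if topic_b in topics:
--                 full_synonyms.setdefault(topic_b, []).append(topic_a)
--
--     # Union all connected topics
--     for topic_a, syn_list in full_synonyms.items():
--         for topic_b in syn_list:
--             if topic_a in topics and topic_b in topics:
--                 union(topic_a, topic_b)
--
--     # Collect groups based on the final root
--     groups: Dict[str, Set[str]] = {}
--     for topic in topics: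
--         root = find(topic)
--         groups.setdefault(root, set()).add(topic)
--
--     return list(groups.values())
-- ===== SOURCE B (Python) =====
-- def get_transitive_synonym_groups(topics, topic_synonyms):
--     """Groups topics that must merge due to direct or indirect synonym relationships.
--
--     Alternative to the union-find version: build an undirected adjacency map once
--     (set lookups instead of list scans), then collect each connected component by
--     iterated frontier expansion.
--     """
--     topic_set = set(topics)
--     order = list(dict.fromkeys(topics))  # distinct topics, first-occurrence order
--     adj = {t: set() for t in order}
--     for a, syn_list in topic_synonyms.items():
--         if a in topic_set:
--             for b in syn_list:
--                 if b in topic_set: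
--                     adj[a].add(b)
--                     adj[b].add(a)
--     seen = set()
--     groups = []
--     for t in order:
--         if t in seen:
--             continue
--         comp = {t}
--         while True:
--             new = comp | {v for u in comp for v in adj[u]}
--             if len(new) == len(comp):
--                 break
--             comp = new
--         seen |= comp
--         groups.append({x for x in order if x in comp})
--     return groups
-- ===== Notes on version B (the rewrite author's own statement) =====
-- stated objective: alternative
-- what changed: A's union-find with path compression over a symmetrised synonym dict (with O(N) list-membership guards) is replaced by building an undirected adjacency map of sets in one pass and collecting each connected component by iterated frontier expansion, emitting groups in first-occurrence order.
import Mathlib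
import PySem

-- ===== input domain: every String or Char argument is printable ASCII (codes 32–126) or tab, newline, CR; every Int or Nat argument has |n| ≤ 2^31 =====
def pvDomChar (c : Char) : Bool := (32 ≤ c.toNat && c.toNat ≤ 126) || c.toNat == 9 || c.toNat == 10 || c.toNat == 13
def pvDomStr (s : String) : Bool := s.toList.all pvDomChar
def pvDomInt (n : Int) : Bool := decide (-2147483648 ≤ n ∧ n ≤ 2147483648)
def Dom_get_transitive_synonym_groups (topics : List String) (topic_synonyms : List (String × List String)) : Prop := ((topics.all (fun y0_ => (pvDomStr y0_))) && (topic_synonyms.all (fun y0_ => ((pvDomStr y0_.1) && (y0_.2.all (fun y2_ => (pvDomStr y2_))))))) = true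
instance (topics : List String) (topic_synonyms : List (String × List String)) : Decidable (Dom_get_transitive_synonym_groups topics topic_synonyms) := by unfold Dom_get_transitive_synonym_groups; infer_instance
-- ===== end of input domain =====

-- B replaces A's union-find over a list-membership-guarded synonym map by an adjacency map
-- (set lookups) plus per-component closure by frontier expansion; same return value, proved below.

-- ===== PORT A =====
-- A's recursive `find` with path compression; it returns (root, updated parent).
-- The fuel argument only makes the recursion structural: A's parent chains are acyclic and
-- strictly shorter than `topics.length + 1` (proved below), so the fuel is never exhausted.
def pvFindA : Nat → PySem.Dict String String → String → String × PySem.Dict String String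
  | 0, p, i => (i, p)
  | f+1, p, i =>
    match p.get? i with
    | none => (i, p)            -- KeyError guard; unreachable: `find` is only called on keys of parent
    | some pi =>
      if pi = i then (i, p)
      else
        let r := (pvFindA f p pi).1
        let p' := (pvFindA f p pi).2
        (r, p'.insert i r)

def pvUnionA (fuel : Nat) (p : PySem.Dict String String) (i j : String) : PySem.Dict String String :=
  let ri := (pvFindA fuel p i).1
  let p1 := (pvFindA fuel p i).2
  let rj := (pvFindA fuel p1 j).1
  let p2 := (pvFindA fuel p1 j).2
  if ri ≠ rj then p2.insert ri rj else p2

-- the `full_synonyms` dict: setdefault(k, []).extend/append is Dict.modify k [] (· ++ …)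
def pvFullSyn (topics : List String) (topic_synonyms : List (String × List String)) :
    PySem.Dict String (List String) :=
  topic_synonyms.foldl (fun d ab =>
    let d1 := if topics.contains ab.1 then d.modify ab.1 [] (· ++ ab.2) else d
    ab.2.foldl (fun d2 b => if topics.contains b then d2.modify b [] (· ++ [ab.1]) else d2) d1)
    (PySem.Dict.mk [])

def get_transitive_synonym_groups (topics : List String) (topic_synonyms : List (String × List String)) : List (List String) :=
  let fuel := topics.length + 1
  let parent0 : PySem.Dict String String := topics.foldl (fun d t => d.insert t t) (PySem.Dict.mk [])
  let full := pvFullSyn topics topic_synonyms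
  let parent1 := full.items.foldl (fun p it =>
      it.2.foldl (fun p b =>
        if topics.contains it.1 && topics.contains b then pvUnionA fuel p it.1 b else p) p) parent0
  let st := topics.foldl
      (fun (st : PySem.Dict String (PySem.Set String) × PySem.Dict String String) t =>
        let r := (pvFindA fuel st.2 t).1
        let p' := (pvFindA fuel st.2 t).2
        (st.1.modify r PySem.Set.empty (fun s => s.add t), p'))
      (PySem.Dict.mk [], parent1)
  st.1.values

-- ===== PORT B =====
-- {v for u in comp for v in adj[u]} — a set built from comp's elements (used only set-wise)
def pvNbrs (adj : PySem.Dict String (PySem.Set String)) (comp : PySem.Set String) : PySem.Set String :=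
  comp.foldl (fun acc u => PySem.Set.union acc (adj.getD u PySem.Set.empty)) PySem.Set.empty

-- B's `while True` frontier-expansion loop; fuel `order.length + 1` suffices because each
-- non-terminating pass strictly grows comp inside order (proved below).
def pvClosure : Nat → PySem.Dict String (PySem.Set String) → PySem.Set String → PySem.Set String
  | 0, _, comp => comp
  | f+1, adj, comp =>
    let nw := PySem.Set.union comp (pvNbrs adj comp)
    if nw.length = comp.length then comp else pvClosure f adj nw

-- adjacency map; adj[a].add(b) is Dict.modify (exact: a and b are keys of adj)
def pvAdj (topics order : List String) (topic_synonyms : List (String × List String)) :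
    PySem.Dict String (PySem.Set String) :=
  let tset := PySem.Set.ofList topics
  let adj0 := order.foldl (fun d t => d.insert t (PySem.Set.empty : PySem.Set String)) (PySem.Dict.mk [])
  topic_synonyms.foldl (fun d ab =>
    if tset.contains ab.1 then
      ab.2.foldl (fun d2 b =>
        if tset.contains b then
          (d2.modify ab.1 PySem.Set.empty (fun s => s.add b)).modify b PySem.Set.empty (fun s => s.add ab.1)
        else d2) d
    else d) adj0

def get_transitive_synonym_groups_alt (topics : List String) (topic_synonyms : List (String × List String)) : List (List String) :=
  let order := PySem.List.dedup topics
  let adj := pvAdj topics order topic_synonyms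
  let st := order.foldl
      (fun (st : PySem.Set String × List (List String)) t =>
        if st.1.contains t then st
        else
          let comp := pvClosure (order.length + 1) adj (PySem.Set.ofList [t])
          (PySem.Set.union st.1 comp,
           st.2 ++ [PySem.Set.ofList (order.filter (fun x => comp.contains x))]))
      (PySem.Set.empty, [])
  st.2

-- ===== PRECONDITION & SPEC =====
def Spec_get_transitive_synonym_groups (topics : List String) (topic_synonyms : List (String × List String)) (out : List (List String)) : Prop := out = get_transitive_synonym_groups_alt topics topic_synonyms
instance (topics : List String) (topic_synonyms : List (String × List String)) (out : List (List String)) : Decidable (Spec_get_transitive_synonym_groups topics topic_synonyms out) := by unfold Spec_get_transitive_synonym_groups; infer_instance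

-- ===== CLAIM (what is proved, stated in full; the proofs are below) =====
def Claim_equal_get_transitive_synonym_groups : Prop := ∀ (topics : List String) (topic_synonyms : List (String × List String)), Dom_get_transitive_synonym_groups topics topic_synonyms → Spec_get_transitive_synonym_groups topics topic_synonyms (get_transitive_synonym_groups topics topic_synonyms)

-- ===== LEMMAS AND PROOFS =====

-- ---------- generic equivalence-relation helpers ----------

theorem pvEqvGen_iff_of_iff {α : Type} {R R' : α → α → Prop} (h : ∀ x y, R x y ↔ R' x y)
    (x y : α) : Relation.EqvGen R x y ↔ Relation.EqvGen R' x y :=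
  ⟨Relation.EqvGen.mono (fun a b hr => (h a b).1 hr), Relation.EqvGen.mono (fun a b hr => (h a b).2 hr)⟩

theorem pvEqvGen_iff_rtg {α : Type} {R : α → α → Prop} (hs : Symmetric R) (x y : α) :
    Relation.EqvGen R x y ↔ Relation.ReflTransGen R x y := by
  constructor
  · intro h
    induction h with
    | rel a b hr => exact Relation.ReflTransGen.single hr
    | refl => exact Relation.ReflTransGen.refl
    | symm a b _ ih => exact (Relation.ReflTransGen.symmetric hs) ih
    | trans a b c _ _ ih1 ih2 => exact ih1.trans ih2
  · intro h
    induction h with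
    | refl => exact Relation.EqvGen.refl _
    | tail _ hr ih => exact Relation.EqvGen.trans _ _ _ ih (Relation.EqvGen.rel _ _ hr)

-- ---------- the union-find invariant ----------

-- ρ is the root function A's parent forest computes; d is an acyclicity certificate
def pvUF (T : List String) (p : PySem.Dict String String) (ρ : String → String) (d : String → Nat) : Prop :=
  (∀ i : String, (p.get? i).isSome ↔ i ∈ T) ∧
  ∀ i ∈ T, ∃ j, p.get? i = some j ∧ j ∈ T ∧ ρ j = ρ i ∧ (j = i → ρ i = i) ∧ (j ≠ i → d j < d i)

def pvUFI (T : List String) (p : PySem.Dict String String) (ρ : String → String) : Prop :=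
  ∃ d, pvUF T p ρ d

theorem pvUF_root {T p ρ d} (h : pvUF T p ρ d) :
    ∀ n, ∀ i, d i ≤ n → i ∈ T → ρ i ∈ T ∧ ρ (ρ i) = ρ i ∧ (ρ i ≠ i → d (ρ i) < d i) := by
  intro n
  induction n with
  | zero =>
    intro i hd hi
    obtain ⟨j, _, hjT, hρj, hji, hlt⟩ := h.2 i hi
    by_cases hji' : j = i
    · have : ρ i = i := hji hji'
      rw [this]
      exact ⟨hi, this, fun hne => absurd rfl hne⟩
    · exact absurd (Nat.lt_of_lt_of_le (hlt hji') hd) (Nat.not_lt_zero _)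
  | succ n ih =>
    intro i hd hi
    obtain ⟨j, _, hjT, hρj, hji, hlt⟩ := h.2 i hi
    by_cases hji' : j = i
    · have : ρ i = i := hji hji'
      rw [this]
      exact ⟨hi, this, fun hne => absurd rfl hne⟩
    · have hdj : d j ≤ n := by have := hlt hji'; omega
      obtain ⟨h1, h2, h3⟩ := ih j hdj hjT
      rw [hρj] at h1 h2 h3
      refine ⟨h1, h2, fun hne => ?_⟩
      by_cases hρjj : ρ i = j
      · rw [hρjj]; exact hlt hji'
      · exact Nat.lt_trans (h3 hρjj) (hlt hji')

theorem pvUF_congr {T p ρ ρ' d} (h : pvUF T p ρ d) (hρ : ∀ x, ρ x = ρ' x) : pvUF T p ρ' d := by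
  refine ⟨h.1, fun i hi => ?_⟩
  obtain ⟨j, h1, h2, h3, h4, h5⟩ := h.2 i hi
  exact ⟨j, h1, h2, by rw [← hρ, ← hρ]; exact h3, fun hj => by rw [← hρ]; exact h4 hj, h5⟩

-- find returns the root and keeps the invariant (with the same certificate)
theorem pvFindA_spec {T ρ} (d : String → Nat) :
    ∀ n f p i, pvUF T p ρ d → i ∈ T → d i < f → d i ≤ n →
      (pvFindA f p i).1 = ρ i ∧ pvUF T (pvFindA f p i).2 ρ d := by
  intro n
  induction n with
  | zero =>
    intro f p i h hi hf hd
    obtain ⟨j, hj, hjT, hρj, hji, hlt⟩ := h.2 i hi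
    have hji' : j = i := by
      by_contra hne
      exact absurd (Nat.lt_of_lt_of_le (hlt hne) hd) (Nat.not_lt_zero _)
    obtain ⟨f', rfl⟩ : ∃ f', f = f' + 1 := ⟨f - 1, by omega⟩
    simp only [pvFindA, hj, hji']
    exact ⟨(hji hji').symm, h⟩
  | succ n ih =>
    intro f p i h hi hf hd
    obtain ⟨j, hj, hjT, hρj, hji, hlt⟩ := h.2 i hi
    obtain ⟨f', rfl⟩ : ∃ f', f = f' + 1 := ⟨f - 1, by omega⟩
    by_cases hji' : j = i
    · simp only [pvFindA, hj, hji']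
      exact ⟨(hji hji').symm, h⟩
    · have hdj : d j < d i := hlt hji'
      have hf1 : d j < f' := Nat.lt_of_lt_of_le hdj (Nat.lt_succ_iff.mp hf)
      have hf2 : d j ≤ n := Nat.lt_succ_iff.mp (Nat.lt_of_lt_of_le hdj hd)
      have hrec := ih f' p j h hjT hf1 hf2
      simp only [pvFindA, hj, if_neg hji']
      obtain ⟨hfst, hUF⟩ := hrec
      constructor
      · simp only [hfst, hρj]
      · -- the compressing insert keeps the invariant
        have hroot := pvUF_root h (d i) i (Nat.le_refl _) hi
        constructor
        · intro x
          rw [PySem.Dict.get?_insert]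
          by_cases hx : x = i
          · subst hx; simp [hi]
          · simp only [if_neg hx]; exact hUF.1 x
        · intro x hx
          by_cases hxi : x = i
          · subst hxi
            refine ⟨(pvFindA f' p j).1, ?_, ?_, ?_, ?_, ?_⟩
            · rw [PySem.Dict.get?_insert, if_pos rfl]
            · rw [hfst, hρj]; exact hroot.1
            · rw [hfst, hρj]; exact hroot.2.1
            · intro hr; rw [hfst, hρj] at hr; rw [hr]
            · intro hr
              rw [hfst, hρj] at hr ⊢
              exact hroot.2.2 hr
          · obtain ⟨j', h1, h2, h3, h4, h5⟩ := hUF.2 x hx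
            exact ⟨j', by rw [PySem.Dict.get?_insert, if_neg hxi]; exact h1, h2, h3, h4, h5⟩


-- ---------- bounded certificate regeneration ----------

def pvSteps : Nat → PySem.Dict String String → String → Nat
  | 0, _, _ => 0
  | f+1, p, i =>
    match p.get? i with
    | some j => if j = i then 0 else pvSteps f p j + 1
    | none => 0

theorem pvSteps_stable {T p ρ d} (h : pvUF T p ρ d) :
    ∀ n i f f', i ∈ T → d i < f → d i < f' → d i ≤ n → pvSteps f p i = pvSteps f' p i := by
  intro n
  induction n with
  | zero =>
    intro i f f' hi hf hf' hd
    obtain ⟨j, hj, hjT, _, _, hlt⟩ := h.2 i hi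
    have hji : j = i := by
      by_contra hne; exact absurd (Nat.lt_of_lt_of_le (hlt hne) hd) (Nat.not_lt_zero _)
    obtain ⟨g, rfl⟩ : ∃ g, f = g + 1 := ⟨f - 1, by omega⟩
    obtain ⟨g', rfl⟩ : ∃ g', f' = g' + 1 := ⟨f' - 1, by omega⟩
    simp [pvSteps, hj, hji]
  | succ n ih =>
    intro i f f' hi hf hf' hd
    obtain ⟨j, hj, hjT, _, _, hlt⟩ := h.2 i hi
    obtain ⟨g, rfl⟩ : ∃ g, f = g + 1 := ⟨f - 1, by omega⟩
    obtain ⟨g', rfl⟩ : ∃ g', f' = g' + 1 := ⟨f' - 1, by omega⟩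
    by_cases hji : j = i
    · simp [pvSteps, hj, hji]
    · have hdj := hlt hji
      simp only [pvSteps, hj, if_neg hji]
      rw [ih j g g' hjT (by omega) (by omega) (by omega)]

theorem pvRegen {T p ρ d} (h : pvUF T p ρ d) :
    ∃ d', pvUF T p ρ d' ∧ ∀ i ∈ T, d' i < T.length + 1 := by
  classical
  set σ : String → Nat := fun i => pvSteps (d i + 1) p i with hσ
  -- local step characterisation of σ
  have hstep : ∀ i ∈ T, ∃ j, p.get? i = some j ∧ (j = i → σ i = 0) ∧ (j ≠ i → σ i = σ j + 1) := by
    intro i hi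
    obtain ⟨j, hj, hjT, _, _, hlt⟩ := h.2 i hi
    refine ⟨j, hj, ?_, ?_⟩
    · intro hji; simp [hσ, pvSteps, hj, hji]
    · intro hji
      have hdj := hlt hji
      simp only [hσ, pvSteps, hj, if_neg hji]
      rw [pvSteps_stable h (d j) j (d i) (d j + 1) hjT (by omega) (by omega) (by omega)]
      simp only [pvSteps]
  -- σ is itself a certificate
  have hUF : pvUF T p ρ σ := by
    refine ⟨h.1, fun i hi => ?_⟩
    obtain ⟨j, hj, hjT, hρj, hji, _⟩ := h.2 i hi
    obtain ⟨j', hj', _, hne'⟩ := hstep i hi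
    rw [hj] at hj'; injection hj' with hjj; subst hjj
    exact ⟨j, hj, hjT, hρj, hji, fun hne => by rw [hne' hne]; omega⟩
  -- σ is bounded by the number of distinct topics
  have hbound : ∀ n, ∀ i, d i ≤ n → i ∈ T →
      ∃ s : Finset String, (∀ x ∈ s, x ∈ T ∧ σ x ≤ σ i) ∧ i ∈ s ∧ s.card = σ i + 1 := by
    intro n
    induction n with
    | zero =>
      intro i hd hi
      obtain ⟨j, hj, hjT, _, _, hlt⟩ := h.2 i hi
      have hji : j = i := by
        by_contra hne; exact absurd (Nat.lt_of_lt_of_le (hlt hne) hd) (Nat.not_lt_zero _)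
      obtain ⟨j', hj', heq0, _⟩ := hstep i hi
      rw [hj] at hj'; injection hj' with hjj; subst hjj
      exact ⟨{i}, by simp [hi], by simp, by simp [heq0 hji]⟩
    | succ n ih =>
      intro i hd hi
      obtain ⟨j, hj, hjT, _, _, hlt⟩ := h.2 i hi
      obtain ⟨j', hj', heq0, hsucc⟩ := hstep i hi
      rw [hj] at hj'; injection hj' with hjj; subst hjj
      by_cases hji : j = i
      · exact ⟨{i}, by simp [hi], by simp, by simp [heq0 hji]⟩
      · have hdj := hlt hji
        obtain ⟨s, hs1, hs2, hs3⟩ := ih j (by omega) hjT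
        have hσi : σ i = σ j + 1 := hsucc hji
        have hi_not : i ∉ s := by
          intro hmem
          have := (hs1 i hmem).2
          omega
        refine ⟨insert i s, ?_, Finset.mem_insert_self _ _, ?_⟩
        · intro x hx
          rcases Finset.mem_insert.mp hx with rfl | hx'
          · exact ⟨hi, Nat.le_refl _⟩
          · exact ⟨(hs1 x hx').1, by have := (hs1 x hx').2; omega⟩
        · rw [Finset.card_insert_of_notMem hi_not, hs3, hσi]
  refine ⟨σ, hUF, fun i hi => ?_⟩
  obtain ⟨s, hs1, _, hs3⟩ := hbound (d i) i (Nat.le_refl _) hi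
  have hsub : s ⊆ T.toFinset := by
    intro x hx
    exact List.mem_toFinset.mpr (hs1 x hx).1
  have := Finset.card_le_card hsub
  have := T.toFinset_card_le
  omega

-- find/union with the fuel the ports pass
theorem pvFind_full {T p ρ} (h : pvUFI T p ρ) {i} (hi : i ∈ T) :
    (pvFindA (T.length + 1) p i).1 = ρ i ∧ pvUFI T (pvFindA (T.length + 1) p i).2 ρ := by
  obtain ⟨d, hd⟩ := h
  obtain ⟨d', hd', hb⟩ := pvRegen hd
  obtain ⟨h1, h2⟩ := pvFindA_spec d' (d' i) (T.length + 1) p i hd' hi (hb i hi) (Nat.le_refl _)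
  exact ⟨h1, d', h2⟩

def pvMerge (ρ : String → String) (a b : String) : String → String :=
  fun x => if ρ x = ρ a then ρ b else ρ x

theorem pvUnion_full {T p ρ} (h : pvUFI T p ρ) {a b} (ha : a ∈ T) (hb : b ∈ T) :
    pvUFI T (pvUnionA (T.length + 1) p a b) (pvMerge ρ a b) := by
  classical
  obtain ⟨hfa, h1⟩ := pvFind_full h ha
  obtain ⟨hfb, h2⟩ := pvFind_full h1 hb
  simp only [pvUnionA, hfa, hfb]
  set p2 := (pvFindA (T.length + 1) (pvFindA (T.length + 1) p a).2 b).2 with hp2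
  obtain ⟨d2, hd2⟩ := h2
  have hroots_a := pvUF_root hd2 (d2 a) a (Nat.le_refl _) ha
  have hroots_b := pvUF_root hd2 (d2 b) b (Nat.le_refl _) hb
  by_cases hab : ρ a = ρ b
  · rw [if_neg (show ¬(ρ a ≠ ρ b) from fun hc => hc hab)]
    refine ⟨d2, pvUF_congr hd2 fun x => ?_⟩
    simp only [pvMerge]
    split <;> simp_all
  · rw [if_pos (show ρ a ≠ ρ b from hab)]
    set dd : String → Nat := fun x => if ρ x = ρ a then d2 x + d2 (ρ b) + 1 else d2 x with hdd
    have hdd_of : ∀ x, dd x = if ρ x = ρ a then d2 x + d2 (ρ b) + 1 else d2 x := fun x => rfl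
    refine ⟨dd, ?_, ?_⟩
    · intro x
      rw [PySem.Dict.get?_insert]
      by_cases hx : x = ρ a
      · subst hx; simp [hroots_a.1]
      · simp only [if_neg hx]; exact hd2.1 x
    · intro x hx
      by_cases hxa : x = ρ a
      · subst hxa
        refine ⟨ρ b, by rw [PySem.Dict.get?_insert, if_pos rfl], hroots_b.1, ?_, ?_, ?_⟩
        · simp only [pvMerge, hroots_b.2.1, hroots_a.2.1]
          rw [if_neg (fun hc => hab hc.symm)]; simp
        · intro hba
          exact absurd hba.symm hab
        · intro _
          rw [hdd_of, hdd_of, if_neg (by rw [hroots_b.2.1]; exact fun hc => hab hc.symm),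
              if_pos (by rw [hroots_a.2.1])]
          omega
      · obtain ⟨j, hj1, hj2, hj3, hj4, hj5⟩ := hd2.2 x hx
        refine ⟨j, by rw [PySem.Dict.get?_insert, if_neg hxa]; exact hj1, hj2, ?_, ?_, ?_⟩
        · simp only [pvMerge, hj3]
        · intro hjx
          have hρx : ρ x = x := hj4 hjx
          simp only [pvMerge]
          rw [if_neg (by rw [hρx]; exact hxa), hρx]
        · intro hjx
          have := hj5 hjx
          rw [hdd_of, hdd_of, hj3]
          split <;> omega

-- ---------- the equivalence relation computed by the union fold ----------

def pvRel (S : List (String × String)) : String → String → Prop := fun x y => (x, y) ∈ S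

def pvMatch (ρ : String → String) (S : List (String × String)) : Prop :=
  ∀ x y, ρ x = ρ y ↔ Relation.EqvGen (pvRel S) x y

theorem pvMatch_nil : pvMatch id [] := by
  intro x y
  simp only [id]
  constructor
  · intro h; rw [h]; exact Relation.EqvGen.refl _
  · intro h
    induction h with
    | rel a b hr => exact absurd hr (by simp [pvRel])
    | refl => rfl
    | symm a b _ ih => exact ih.symm
    | trans a b c _ _ ih1 ih2 => exact ih1.trans ih2

theorem pvMatch_merge {ρ S} (h : pvMatch ρ S) (a b : String) :
    pvMatch (pvMerge ρ a b) (S ++ [(a, b)]) := by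
  classical
  have hmono : ∀ x y, Relation.EqvGen (pvRel S) x y → Relation.EqvGen (pvRel (S ++ [(a, b)])) x y :=
    fun x y => Relation.EqvGen.mono (fun u v huv => by simp [pvRel] at huv ⊢; exact Or.inl huv)
  have hab : Relation.EqvGen (pvRel (S ++ [(a, b)])) a b :=
    Relation.EqvGen.rel _ _ (by simp [pvRel])
  intro x y
  constructor
  · intro hxy
    simp only [pvMerge] at hxy
    split_ifs at hxy with h1 h2 h2
    · exact (hmono _ _ ((h x y).mp (h1.trans h2.symm)))
    · -- x ~ a, y is not: ρ y = ρ b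
      exact .trans _ _ _ (hmono _ _ ((h x a).mp h1))
             (.trans _ _ _ hab (.symm _ _ (hmono _ _ ((h y b).mp hxy.symm))))
    · exact .trans _ _ _ (hmono _ _ ((h x b).mp hxy))
             (.trans _ _ _ (.symm _ _ hab) (.symm _ _ (hmono _ _ ((h y a).mp h2))))
    · exact hmono _ _ ((h x y).mp hxy)
  · intro hxy
    induction hxy with
    | rel u v huv =>
      simp only [pvRel, List.mem_append, List.mem_singleton] at huv
      rcases huv with huv | huv
      · have : ρ u = ρ v := (h u v).mpr (Relation.EqvGen.rel _ _ huv)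
        simp only [pvMerge, this]
      · obtain ⟨rfl, rfl⟩ : u = a ∧ v = b := by
          constructor <;> [exact congrArg Prod.fst huv; exact congrArg Prod.snd huv]
        simp [pvMerge]
    | refl => rfl
    | symm u v _ ih => exact ih.symm
    | trans u v w _ _ ih1 ih2 => exact ih1.trans ih2

-- folding A's guarded unions over a list of pairs
theorem pvFold_spec (T : List String) :
    ∀ (L : List (String × String)) p ρ S,
      (∀ ab ∈ L, ab.1 ∈ T ∧ ab.2 ∈ T) → pvUFI T p ρ → pvMatch ρ S →
      pvUFI T (L.foldl (fun p ab => pvUnionA (T.length + 1) p ab.1 ab.2) p)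
        (L.foldl (fun ρ ab => pvMerge ρ ab.1 ab.2) ρ) ∧
      pvMatch (L.foldl (fun ρ ab => pvMerge ρ ab.1 ab.2) ρ) (S ++ L) := by
  intro L
  induction L with
  | nil => intro p ρ S _ h1 h2; simpa using ⟨h1, h2⟩
  | cons ab L ih =>
    intro p ρ S hmem h1 h2
    have hab := hmem ab (List.mem_cons_self ..)
    have h1' := pvUnion_full h1 hab.1 hab.2
    have h2' := pvMatch_merge h2 ab.1 ab.2
    have := ih (pvUnionA (T.length + 1) p ab.1 ab.2) (pvMerge ρ ab.1 ab.2) (S ++ [(ab.1, ab.2)])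
      (fun x hx => hmem x (List.mem_cons_of_mem _ hx)) h1' h2'
    simpa using this

-- the flattened, guard-filtered pair list of A's nested union loop
def pvFlat (T : List String) (items : List (String × List String)) : List (String × String) :=
  items.flatMap (fun it =>
    (it.2.filter (fun b => T.contains it.1 && T.contains b)).map (fun b => (it.1, b)))

theorem pvLoopA_eq_flat {α : Type} (T : List String) (u : α → String → String → α) :
    ∀ (items : List (String × List String)) (p : α),
      items.foldl (fun p it => it.2.foldl
        (fun p b => if T.contains it.1 && T.contains b then u p it.1 b else p) p) p
      = (pvFlat T items).foldl (fun p ab => u p ab.1 ab.2) p := by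
  intro items
  induction items with
  | nil => intro p; rfl
  | cons it rest ih =>
    intro p
    simp only [List.foldl_cons, pvFlat, List.flatMap_cons, List.foldl_append, ih]
    congr 1
    rw [List.foldl_map, List.foldl_filter]

theorem mem_pvFlat (T : List String) (items : List (String × List String)) (x y : String) :
    (x, y) ∈ pvFlat T items ↔ (∃ l, (x, l) ∈ items ∧ y ∈ l) ∧ x ∈ T ∧ y ∈ T := by
  simp only [pvFlat, List.mem_flatMap, List.mem_map, List.mem_filter, Bool.and_eq_true,
    List.contains_iff_mem]
  constructor
  · rintro ⟨it, hit, b, ⟨hb, h1, h2⟩, heq⟩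
    obtain ⟨rfl, rfl⟩ : it.1 = x ∧ b = y := by
      constructor <;> [exact congrArg Prod.fst heq; exact congrArg Prod.snd heq]
    exact ⟨⟨it.2, hit, hb⟩, h1, h2⟩
  · rintro ⟨⟨l, hl, hy⟩, h1, h2⟩
    exact ⟨(x, l), hl, y, ⟨hy, h1, h2⟩, rfl⟩

-- ---------- ordered de-duplication bookkeeping ----------

-- first occurrences of l whose value is not already in R (dedup relative to seen-set R)
def pvDedupFrom : List String → List String → List String
  | [], _ => []
  | x :: xs, R => if x ∈ R then pvDedupFrom xs R else x :: pvDedupFrom xs (R ++ [x])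

theorem pvFoldl_add_eq (l : List String) :
    ∀ R : List String, l.foldl PySem.Set.add R = R ++ pvDedupFrom l R := by
  induction l with
  | nil => intro R; simp [pvDedupFrom]
  | cons x xs ih =>
    intro R
    simp only [List.foldl_cons, pvDedupFrom]
    by_cases hx : x ∈ R
    · rw [if_pos hx, show PySem.Set.add R x = R from by
        simp [PySem.Set.add, hx], ih]
    · rw [if_neg hx, show PySem.Set.add R x = R ++ [x] from by
        simp [PySem.Set.add, hx], ih, List.append_assoc]
      rfl

theorem pvDedup_eq (l : List String) : PySem.List.dedup l = pvDedupFrom l [] := by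
  have := pvFoldl_add_eq l []
  simpa [PySem.List.dedup, PySem.Set.ofList, PySem.Set.empty] using this

theorem mem_pvDedupFrom (x : String) :
    ∀ (l R : List String), x ∈ pvDedupFrom l R ↔ x ∈ l ∧ x ∉ R := by
  intro l
  induction l with
  | nil => intro R; simp [pvDedupFrom]
  | cons y ys ih =>
    intro R
    simp only [pvDedupFrom]
    by_cases hy : y ∈ R
    · rw [if_pos hy, ih]
      constructor
      · rintro ⟨h1, h2⟩; exact ⟨List.mem_cons_of_mem _ h1, h2⟩
      · rintro ⟨h1, h2⟩
        rcases List.mem_cons.mp h1 with rfl | h1'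
        · exact absurd hy h2
        · exact ⟨h1', h2⟩
    · rw [if_neg hy]
      simp only [List.mem_cons, ih, List.mem_append]
      constructor
      · rintro (rfl | ⟨h1, h2⟩)
        · exact ⟨Or.inl rfl, hy⟩
        · exact ⟨Or.inr h1, fun hc => h2 (Or.inl hc)⟩
      · rintro ⟨rfl | h1, h2⟩
        · exact Or.inl rfl
        · by_cases hxy : x = y
          · exact Or.inl hxy
          · exact Or.inr ⟨h1, fun hc => hc.elim h2 (fun hcc => hcc.elim hxy (fun hf => nomatch hf))⟩

theorem nodup_pvDedupFrom : ∀ (l R : List String), (pvDedupFrom l R).Nodup := by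
  intro l
  induction l with
  | nil => intro R; simp [pvDedupFrom]
  | cons y ys ih =>
    intro R
    simp only [pvDedupFrom]
    split
    · exact ih R
    · refine List.nodup_cons.mpr ⟨fun hc => ?_, ih (R ++ [y])⟩
      exact ((mem_pvDedupFrom y ys (R ++ [y])).mp hc).2 (by simp)

theorem pvDedupFrom_append (m1 m2 R : List String) :
    pvDedupFrom (m1 ++ m2) R = pvDedupFrom m1 R ++ pvDedupFrom m2 (R ++ pvDedupFrom m1 R) := by
  have h1 := pvFoldl_add_eq (m1 ++ m2) R
  rw [List.foldl_append, pvFoldl_add_eq m1 R, pvFoldl_add_eq m2 (R ++ pvDedupFrom m1 R)] at h1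
  rw [List.append_assoc] at h1
  exact (List.append_cancel_left h1.symm)

theorem pvDedupFrom_singleton (r : String) (R : List String) :
    pvDedupFrom [r] R = if r ∈ R then [] else [r] := by
  simp [pvDedupFrom]

theorem pvDedupFrom_filter (q : String → Bool) :
    ∀ (l S S' : List String), (∀ x, q x = true → (x ∈ S ↔ x ∈ S')) →
      (pvDedupFrom l S').filter q = pvDedupFrom (l.filter q) S := by
  intro l
  induction l with
  | nil => intro S S' _; simp [pvDedupFrom]
  | cons y ys ih =>
    intro S S' hagree
    by_cases hy : y ∈ S'
    · rw [show pvDedupFrom (y :: ys) S' = pvDedupFrom ys S' from by rw [pvDedupFrom, if_pos hy]]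
      by_cases hq : q y = true
      · rw [List.filter_cons_of_pos hq,
            show pvDedupFrom (y :: ys.filter q) S = pvDedupFrom (ys.filter q) S from by
              rw [pvDedupFrom, if_pos ((hagree y hq).mpr hy)]]
        exact ih S S' hagree
      · rw [List.filter_cons_of_neg (by simpa using hq)]
        exact ih S S' hagree
    · rw [show pvDedupFrom (y :: ys) S' = y :: pvDedupFrom ys (S' ++ [y]) from by
        rw [pvDedupFrom, if_neg hy]]
      by_cases hq : q y = true
      · have hyS : y ∉ S := fun hc => hy ((hagree y hq).mp hc)
        rw [List.filter_cons_of_pos hq, List.filter_cons_of_pos hq,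
            show pvDedupFrom (y :: ys.filter q) S = y :: pvDedupFrom (ys.filter q) (S ++ [y]) from by
              rw [pvDedupFrom, if_neg hyS]]
        congr 1
        exact ih (S ++ [y]) (S' ++ [y]) (fun x hx => by
          simp only [List.mem_append, List.mem_singleton]
          exact or_congr (hagree x hx) Iff.rfl)
      · rw [List.filter_cons_of_neg (by simpa using hq), List.filter_cons_of_neg (by simpa using hq)]
        exact ih S (S' ++ [y]) (fun x hx => by
          have hxy : x ≠ y := fun hc => hq (hc ▸ hx)
          constructor
          · intro h1
            exact List.mem_append.mpr (Or.inl ((hagree x hx).mp h1))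
          · intro h1
            rcases List.mem_append.mp h1 with h1' | h1'
            · exact (hagree x hx).mpr h1'
            · exact absurd (List.mem_singleton.mp h1') hxy)

theorem pvDedupFrom_map (f : String → String) :
    ∀ (l S R : List String), (∀ x ∈ S, f x ∈ R) →
      pvDedupFrom ((pvDedupFrom l S).map f) R = pvDedupFrom (l.map f) R := by
  intro l
  induction l with
  | nil => intro S R _; simp [pvDedupFrom]
  | cons y ys ih =>
    intro S R hSR
    by_cases hy : y ∈ S
    · rw [show pvDedupFrom (y :: ys) S = pvDedupFrom ys S from by rw [pvDedupFrom, if_pos hy],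
          List.map_cons,
          show pvDedupFrom (f y :: ys.map f) R = pvDedupFrom (ys.map f) R from by
            rw [pvDedupFrom, if_pos (hSR y hy)]]
      exact ih S R hSR
    · rw [show pvDedupFrom (y :: ys) S = y :: pvDedupFrom ys (S ++ [y]) from by
        rw [pvDedupFrom, if_neg hy], List.map_cons, List.map_cons]
      by_cases hfy : f y ∈ R
      · rw [show pvDedupFrom (f y :: (pvDedupFrom ys (S ++ [y])).map f) R
              = pvDedupFrom ((pvDedupFrom ys (S ++ [y])).map f) R from by
            rw [pvDedupFrom, if_pos hfy],
          show pvDedupFrom (f y :: ys.map f) R = pvDedupFrom (ys.map f) R from by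
            rw [pvDedupFrom, if_pos hfy]]
        exact ih (S ++ [y]) R (fun x hx => by
          rcases List.mem_append.mp hx with hx' | hx'
          · exact hSR x hx'
          · rw [List.mem_singleton.mp hx']; exact hfy)
      · rw [show pvDedupFrom (f y :: (pvDedupFrom ys (S ++ [y])).map f) R
              = f y :: pvDedupFrom ((pvDedupFrom ys (S ++ [y])).map f) (R ++ [f y]) from by
            rw [pvDedupFrom, if_neg hfy],
          show pvDedupFrom (f y :: ys.map f) R = f y :: pvDedupFrom (ys.map f) (R ++ [f y]) from by
            rw [pvDedupFrom, if_neg hfy]]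
        congr 1
        exact ih (S ++ [y]) (R ++ [f y]) (fun x hx => by
          rcases List.mem_append.mp hx with hx' | hx'
          · exact List.mem_append.mpr (Or.inl (hSR x hx'))
          · rw [List.mem_singleton.mp hx']; simp)

theorem pvDedupFrom_self : ∀ (l R : List String), l.Nodup → (∀ x ∈ l, x ∉ R) →
    pvDedupFrom l R = l := by
  intro l
  induction l with
  | nil => intro R _ _; rfl
  | cons y ys ih =>
    intro R hnd hR
    rw [pvDedupFrom, if_neg (hR y (List.mem_cons_self ..))]
    congr 1
    refine ih (R ++ [y]) (List.nodup_cons.mp hnd).2 (fun x hx => ?_)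
    intro hc
    rcases List.mem_append.mp hc with hc' | hc'
    · exact hR x (List.mem_cons_of_mem _ hx) hc'
    · exact (List.nodup_cons.mp hnd).1 (List.mem_singleton.mp hc' ▸ hx)

-- ---------- the synonym-pair relation both programs wire up ----------

def pvRaw (ts : List (String × List String)) (a b : String) : Prop := ∃ l, (a, l) ∈ ts ∧ b ∈ l

def pvEdge (T : List String) (ts : List (String × List String)) (x y : String) : Prop :=
  x ∈ T ∧ y ∈ T ∧ (pvRaw ts x y ∨ pvRaw ts y x)

theorem pvEdge_symm (T ts) : Symmetric (pvEdge T ts) := by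
  rintro x y ⟨h1, h2, h3⟩
  exact ⟨h2, h1, h3.symm⟩

-- initial parent dict: every topic maps to itself
theorem pvParent0_get? : ∀ (l : List String) (d : PySem.Dict String String) (x : String),
    (l.foldl (fun d t => d.insert t t) d).get? x = if x ∈ l then some x else d.get? x := by
  intro l
  induction l with
  | nil => intro d x; simp
  | cons t rest ih =>
    intro d x
    rw [List.foldl_cons, ih]
    by_cases hx : x ∈ rest
    · rw [if_pos hx, if_pos (List.mem_cons_of_mem _ hx)]
    · rw [if_neg hx, PySem.Dict.get?_insert]
      by_cases hxt : x = t
      · rw [if_pos hxt, if_pos (by rw [hxt]; exact List.mem_cons_self ..), hxt]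
      · rw [if_neg hxt, if_neg (by simp [hxt, hx])]

theorem pvUFI_parent0 (T : List String) :
    pvUFI T (T.foldl (fun d t => d.insert t t) (PySem.Dict.mk [])) id := by
  refine ⟨fun _ => 0, fun i => ?_, fun i hi => ?_⟩
  · rw [pvParent0_get?]
    by_cases hi : i ∈ T <;> simp [hi, PySem.Dict.get?]
  · refine ⟨i, ?_, hi, rfl, fun _ => rfl, fun hc => absurd rfl hc⟩
    rw [pvParent0_get?, if_pos hi]

-- keys of the built dicts stay duplicate-free
theorem pvNodupKeys_foldl {β : Type} (step : PySem.Dict String β → String → PySem.Dict String β)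
    (hstep : ∀ d x, d.keys.Nodup → (step d x).keys.Nodup) :
    ∀ (l : List String) (d : PySem.Dict String β), d.keys.Nodup → (l.foldl step d).keys.Nodup := by
  intro l
  induction l with
  | nil => intro d hd; exact hd
  | cons x xs ih => intro d hd; exact ih (step d x) (hstep d x hd)

theorem pvNodupKeys_modify {β : Type} (d : PySem.Dict String β) (k : String) (d0 : β) (f : β → β)
    (h : d.keys.Nodup) : (d.modify k d0 f).keys.Nodup := by
  rw [show (d.modify k d0 f).keys = (d.insert k (f (d.getD k d0))).keys from
    PySem.Dict.keys_modify d k d0 f]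
  exact PySem.Dict.nodup_keys_insert d k _ h

theorem pvFullSyn_nodup_keys (T : List String) (ts : List (String × List String)) :
    (pvFullSyn T ts).keys.Nodup := by
  suffices h : ∀ (ts' : List (String × List String)) (d : PySem.Dict String (List String)),
      d.keys.Nodup → (ts'.foldl (fun d ab =>
        let d1 := if T.contains ab.1 then d.modify ab.1 [] (· ++ ab.2) else d
        ab.2.foldl (fun d2 b => if T.contains b then d2.modify b [] (· ++ [ab.1]) else d2) d1) d).keys.Nodup by
    exact h ts (PySem.Dict.mk []) (by simp [PySem.Dict.keys])
  intro ts'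
  induction ts' with
  | nil => intro d hd; exact hd
  | cons ab rest ih =>
    intro d hd
    refine ih _ (pvNodupKeys_foldl _ (fun d2 b hd2 => ?_) ab.2 _ ?_)
    · split
      · exact pvNodupKeys_modify _ _ _ _ hd2
      · exact hd2
    · dsimp only
      split
      · exact pvNodupKeys_modify _ _ _ _ hd
      · exact hd

-- membership in full_synonyms values, computed from the construction loop
theorem pvFullSyn_inner (T : List String) (k : String) :
    ∀ (l : List String) (d : PySem.Dict String (List String)) (a b : String),
      b ∈ (l.foldl (fun d2 c => if T.contains c then d2.modify c [] (· ++ [k]) else d2) d).getD a []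
      ↔ b ∈ d.getD a [] ∨ (a ∈ l ∧ a ∈ T ∧ b = k) := by
  intro l
  induction l with
  | nil => intro d a b; simp
  | cons c cs ih =>
    intro d a b
    rw [List.foldl_cons, ih]
    by_cases hc : c ∈ T
    · rw [if_pos (List.contains_iff_mem.mpr hc), PySem.Dict.getD_modify]
      by_cases hac : a = c
      · subst hac
        rw [if_pos rfl]
        simp only [List.mem_append, List.mem_cons]
        have : a ∈ ([] : List String) ↔ False := by simp
        tauto
      · rw [if_neg hac]
        simp only [List.mem_cons]
        tauto
    · rw [if_neg (by simpa [List.contains_iff_mem] using hc)]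
      simp only [List.mem_cons]
      constructor
      · rintro (h1 | h1)
        · exact Or.inl h1
        · exact Or.inr ⟨Or.inr h1.1, h1.2⟩
      · rintro (h1 | ⟨(h2 | h2), h3, h4⟩)
        · exact Or.inl h1
        · exact absurd (h2 ▸ h3) hc
        · exact Or.inr ⟨h2, h3, h4⟩

theorem pvFullSyn_mem (T : List String) :
    ∀ (ts : List (String × List String)) (a b : String),
      b ∈ (pvFullSyn T ts).getD a [] ↔ a ∈ T ∧ (pvRaw ts a b ∨ pvRaw ts b a) := by
  suffices h : ∀ (ts' : List (String × List String)) (d : PySem.Dict String (List String)) (a b : String),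
      b ∈ (ts'.foldl (fun d ab =>
        let d1 := if T.contains ab.1 then d.modify ab.1 [] (· ++ ab.2) else d
        ab.2.foldl (fun d2 b => if T.contains b then d2.modify b [] (· ++ [ab.1]) else d2) d1) d).getD a []
      ↔ b ∈ d.getD a [] ∨ (a ∈ T ∧ (pvRaw ts' a b ∨ pvRaw ts' b a)) by
    intro ts a b
    rw [pvFullSyn, h]
    simp [PySem.Dict.getD, PySem.Dict.get?]
  intro ts'
  induction ts' with
  | nil => intro d a b; simp [pvRaw]
  | cons ab rest ih =>
    intro d a b
    rw [List.foldl_cons, ih, pvFullSyn_inner]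
    have hraw : ∀ x y : String, pvRaw (ab :: rest) x y ↔ (x = ab.1 ∧ y ∈ ab.2) ∨ pvRaw rest x y := by
      intro x y
      constructor
      · rintro ⟨l, hl, hy⟩
        rcases List.mem_cons.mp hl with h1 | h1
        · refine Or.inl ⟨congrArg Prod.fst h1, ?_⟩
          have : l = ab.2 := congrArg Prod.snd h1
          exact this ▸ hy
        · exact Or.inr ⟨l, h1, hy⟩
      · rintro (⟨rfl, hy⟩ | ⟨l, hl, hy⟩)
        · exact ⟨ab.2, by simp, hy⟩
        · exact ⟨l, List.mem_cons_of_mem _ hl, hy⟩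
    by_cases h1T : ab.1 ∈ T
    · rw [if_pos (List.contains_iff_mem.mpr h1T), PySem.Dict.getD_modify]
      by_cases ha1 : a = ab.1
      · rw [if_pos ha1, ha1]
        simp only [List.mem_append, hraw]
        tauto
      · rw [if_neg ha1]
        simp only [hraw]
        tauto
    · rw [if_neg (by simpa [List.contains_iff_mem] using h1T)]
      simp only [hraw]
      have hni : ∀ x : String, x = ab.1 → x ∈ T → False := fun x h1 h2 => h1T (h1 ▸ h2)
      tauto

-- items of a dict with duplicate-free keys carry exactly its lookups
theorem pvItems_getD {β : Type} (d : PySem.Dict String (List β)) (hn : d.keys.Nodup) (x : String) (y : β) :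
    (∃ l, (x, l) ∈ d.items ∧ y ∈ l) ↔ y ∈ d.getD x [] := by
  constructor
  · rintro ⟨l, hl, hy⟩
    rw [PySem.Dict.getD, PySem.Dict.get?_of_mem_items d hl hn]
    exact hy
  · intro hy
    rw [PySem.Dict.getD] at hy
    cases hget : d.get? x with
    | none => rw [hget] at hy; simp at hy
    | some l =>
      rw [hget] at hy
      simp only [Option.getD_some] at hy
      refine ⟨l, ?_, hy⟩
      rw [PySem.Dict.get?] at hget
      obtain ⟨p, hp1, hp2⟩ := Option.map_eq_some_iff.mp hget
      have hx : p.1 = x := by simpa using List.find?_some hp1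
      have := List.mem_of_find?_eq_some hp1
      rw [show p = (x, l) from Prod.ext hx hp2] at this
      exact this

theorem pvFlatA_iff_edge (T : List String) (ts : List (String × List String)) (x y : String) :
    (x, y) ∈ pvFlat T (pvFullSyn T ts).items ↔ pvEdge T ts x y := by
  rw [mem_pvFlat, pvItems_getD _ (pvFullSyn_nodup_keys T ts), pvFullSyn_mem]
  unfold pvEdge
  tauto

-- the group-collection loop: the parent argument can be dropped once the root function is known
theorem pvGroupsLoop (T : List String) (ρ : String → String) :
    ∀ (l : List String) (G : PySem.Dict String (PySem.Set String)) (p : PySem.Dict String String),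
      pvUFI T p ρ → (∀ t ∈ l, t ∈ T) →
      (l.foldl (fun st t =>
          ((st.1.modify (pvFindA (T.length + 1) st.2 t).1 PySem.Set.empty (fun s => s.add t),
            (pvFindA (T.length + 1) st.2 t).2) :
            PySem.Dict String (PySem.Set String) × PySem.Dict String String)) (G, p)).1
      = l.foldl (fun G t => G.modify (ρ t) PySem.Set.empty (fun s => s.add t)) G := by
  intro l
  induction l with
  | nil => intro G p _ _; rfl
  | cons t rest ih =>
    intro G p hUFI hmem
    have ht := hmem t (List.mem_cons_self ..)
    obtain ⟨hfst, hUFI'⟩ := pvFind_full hUFI ht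
    rw [List.foldl_cons, List.foldl_cons, hfst]
    exact ih _ _ hUFI' (fun u hu => hmem u (List.mem_cons_of_mem _ hu))

-- the grouping fold, in closed form
theorem pvGroupFold_items (f : String → String) :
    ∀ (l : List String),
      ((l.foldl (fun G t => G.modify (f t) PySem.Set.empty (fun s => s.add t)) (PySem.Dict.mk [])).items : List (String × PySem.Set String))
      = (pvDedupFrom (l.map f) []).map
          (fun r => (r, PySem.Set.ofList (l.filter (fun t => decide (f t = r))))) := by
  intro l
  induction l using List.reverseRecOn with
  | nil => simp [pvDedupFrom]
  | append_singleton ys t ih =>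
    rw [List.foldl_append, List.foldl_cons, List.foldl_nil]
    set G := ys.foldl (fun G t => G.modify (f t) PySem.Set.empty (fun s => s.add t)) (PySem.Dict.mk []) with hG
    have hkeys : G.keys = pvDedupFrom (ys.map f) [] := by
      rw [PySem.Dict.keys, ih, List.map_map]
      exact (List.map_congr_left (fun a _ => rfl)).trans (List.map_id _)
    have hkeys_mem : ∀ r : String, r ∈ G.keys ↔ r ∈ ys.map f := by
      intro r
      rw [hkeys, mem_pvDedupFrom]
      simp
    have hnodup : G.keys.Nodup := by rw [hkeys]; exact nodup_pvDedupFrom _ _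
    rw [List.map_append, List.map_singleton, pvDedupFrom_append, pvDedupFrom_singleton]
    by_cases hft : f t ∈ ys.map f
    · -- existing group grows
      rw [if_pos (by simp [mem_pvDedupFrom, hft]), List.append_nil]
      have hcont : G.contains (f t) = true := by
        rw [PySem.Dict.contains_iff_mem_keys, hkeys_mem]
        exact hft
      rw [PySem.Dict.modify, PySem.Dict.items_insert_of_contains _ _ hcont, ih, List.map_map]
      apply List.map_congr_left
      intro r hr
      simp only [Function.comp_apply]
      by_cases hrt : r = f t
      · have hmemitems : (r, PySem.Set.ofList (ys.filter (fun u => decide (f u = r)))) ∈ G.items := by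
          rw [ih]
          exact List.mem_map.mpr ⟨r, hr, rfl⟩
        have hgetD : G.getD r PySem.Set.empty
            = PySem.Set.ofList (ys.filter (fun u => decide (f u = r))) := by
          rw [PySem.Dict.getD, PySem.Dict.get?_of_mem_items G hmemitems hnodup]
          rfl
        have hfil : (ys ++ [t]).filter (fun u => decide (f u = r))
            = ys.filter (fun u => decide (f u = r)) ++ [t] := by
          rw [List.filter_append, List.filter_singleton]
          simp [hrt]
        have hof : PySem.Set.ofList (ys.filter (fun u => decide (f u = r)) ++ [t])
            = (PySem.Set.ofList (ys.filter (fun u => decide (f u = r)))).add t := by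
          rw [PySem.Set.ofList, PySem.Set.ofList, List.foldl_append, List.foldl_cons, List.foldl_nil]
        rw [hfil, hof, ← hgetD]
        simp [hrt]
      · have hfil : (ys ++ [t]).filter (fun u => decide (f u = r))
            = ys.filter (fun u => decide (f u = r)) := by
          have hne : ¬ f t = r := fun hc => hrt hc.symm
          rw [List.filter_append, List.filter_singleton]
          simp [hne]
        rw [hfil]
        simp [hrt]
    · -- a brand-new group is appended
      rw [if_neg (by simp [mem_pvDedupFrom, hft])]
      have hcont : G.contains (f t) = false := by
        rw [show (G.contains (f t) = false) ↔ ¬ (G.contains (f t) = true) from by simp]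
        rw [PySem.Dict.contains_iff_mem_keys, hkeys_mem]
        exact hft
      have hgetD : G.getD (f t) PySem.Set.empty = PySem.Set.empty := by
        rw [PySem.Dict.getD, (PySem.Dict.get?_eq_none_iff_contains _ _).mpr hcont]
        rfl
      rw [PySem.Dict.modify, PySem.Dict.items_insert_of_not_contains _ _ hcont, ih,
          List.map_append, List.map_singleton, hgetD]
      congr 1
      · apply List.map_congr_left
        intro r hr
        have hrmem := (mem_pvDedupFrom r (ys.map f) []).mp hr
        have hrt : ¬ f t = r := fun hc => hft (hc ▸ hrmem.1)
        rw [List.filter_append, List.filter_singleton]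
        simp [hrt]
      · have hfil : ys.filter (fun u => decide (f u = f t)) = [] := by
          rw [List.filter_eq_nil_iff]
          intro u hu
          simp only [decide_eq_true_eq]
          exact fun hc => hft (hc ▸ List.mem_map_of_mem (f := f) hu)
        rw [List.filter_append, List.filter_singleton, hfil]
        simp [PySem.Set.ofList, PySem.Set.add, PySem.Set.empty]

-- ---------- B's adjacency map ----------

theorem pvAdj0_getD (order : List String) :
    ∀ (d : PySem.Dict String (PySem.Set String)) (x : String),
      (∀ z, d.getD z PySem.Set.empty = PySem.Set.empty) →
      (order.foldl (fun d t => d.insert t (PySem.Set.empty : PySem.Set String)) d).getD x PySem.Set.empty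
        = PySem.Set.empty := by
  intro d x h
  induction order generalizing d with
  | nil => exact h x
  | cons t rest ih =>
    rw [List.foldl_cons]
    refine ih _ (fun z => ?_)
    rw [PySem.Dict.getD_insert]
    split
    · rfl
    · exact h z

theorem pvTset (T : List String) (c : String) : ((PySem.Set.ofList T).contains c = true) ↔ c ∈ T :=
  Iff.trans List.contains_iff_mem (PySem.Set.mem_ofList T c)

theorem pvAdj_inner (T : List String) (k : String) :
    ∀ (l : List String) (d : PySem.Dict String (PySem.Set String)) (x y : String),
      y ∈ (l.foldl (fun d2 c =>
          if (PySem.Set.ofList T).contains c then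
            (d2.modify k PySem.Set.empty (fun s => s.add c)).modify c PySem.Set.empty (fun s => s.add k)
          else d2) d).getD x PySem.Set.empty
      ↔ y ∈ d.getD x PySem.Set.empty ∨ ∃ c ∈ l, c ∈ T ∧ ((x = k ∧ y = c) ∨ (x = c ∧ y = k)) := by
  intro l
  induction l with
  | nil => intro d x y; simp
  | cons c cs ih =>
    intro d x y
    rw [List.foldl_cons, ih, List.exists_mem_cons_iff]
    by_cases hc : c ∈ T
    · rw [if_pos ((pvTset T c).mpr hc)]
      have hstep : y ∈ ((d.modify k PySem.Set.empty (fun s => s.add c)).modify c PySem.Set.empty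
          (fun s => s.add k)).getD x PySem.Set.empty
          ↔ y ∈ d.getD x PySem.Set.empty ∨ (x = k ∧ y = c) ∨ (x = c ∧ y = k) := by
        simp only [PySem.Dict.getD_modify]
        by_cases hxc : x = c <;> by_cases hxk : x = k <;> by_cases hck : c = k <;>
          simp_all [PySem.Set.mem_add]
      rw [hstep]
      constructor
      · rintro ((h | h) | h)
        · exact Or.inl h
        · exact Or.inr (Or.inl ⟨hc, h⟩)
        · exact Or.inr (Or.inr h)
      · rintro (h | (⟨_, h⟩ | h))
        · exact Or.inl (Or.inl h)
        · exact Or.inl (Or.inr h)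
        · exact Or.inr h
    · rw [if_neg (fun h => hc ((pvTset T c).mp h))]
      constructor
      · rintro (h | h)
        · exact Or.inl h
        · exact Or.inr (Or.inr h)
      · rintro (h | (⟨h1, _⟩ | h))
        · exact Or.inl h
        · exact absurd h1 hc
        · exact Or.inr h

theorem pvAdj_mem (topics : List String) (ts : List (String × List String)) (x y : String) :
    y ∈ (pvAdj topics (PySem.List.dedup topics) ts).getD x PySem.Set.empty
    ↔ pvEdge topics ts x y := by
  rw [pvAdj]
  have hbase : ∀ z, ((PySem.List.dedup topics).foldl
      (fun d t => d.insert t (PySem.Set.empty : PySem.Set String)) (PySem.Dict.mk [])).getD z PySem.Set.empty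
      = PySem.Set.empty := by
    intro z
    exact pvAdj0_getD _ _ z (fun z' => by simp [PySem.Dict.getD, PySem.Dict.get?])
  suffices h : ∀ (ts' : List (String × List String)) (d : PySem.Dict String (PySem.Set String)),
      (y ∈ (ts'.foldl (fun d ab =>
        if (PySem.Set.ofList topics).contains ab.1 then
          ab.2.foldl (fun d2 b =>
            if (PySem.Set.ofList topics).contains b then
              (d2.modify ab.1 PySem.Set.empty (fun s => s.add b)).modify b PySem.Set.empty (fun s => s.add ab.1)
            else d2) d
        else d) d).getD x PySem.Set.empty
      ↔ y ∈ d.getD x PySem.Set.empty ∨ (x ∈ topics ∧ y ∈ topics ∧ (pvRaw ts' x y ∨ pvRaw ts' y x))) by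
    rw [h ts _]
    simp only [hbase]
    unfold pvEdge
    simp
  intro ts'
  induction ts' with
  | nil => intro d; simp [pvRaw]
  | cons ab rest ih =>
    intro d
    rw [List.foldl_cons]
    have hraw : ∀ u v : String, pvRaw (ab :: rest) u v ↔ (u = ab.1 ∧ v ∈ ab.2) ∨ pvRaw rest u v := by
      intro u v
      constructor
      · rintro ⟨l, hl, hv⟩
        rcases List.mem_cons.mp hl with h1 | h1
        · refine Or.inl ⟨congrArg Prod.fst h1, ?_⟩
          have : l = ab.2 := congrArg Prod.snd h1
          exact this ▸ hv
        · exact Or.inr ⟨l, h1, hv⟩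
      · rintro (⟨rfl, hv⟩ | ⟨l, hl, hv⟩)
        · exact ⟨ab.2, by simp, hv⟩
        · exact ⟨l, List.mem_cons_of_mem _ hl, hv⟩
    by_cases h1T : ab.1 ∈ topics
    · rw [if_pos ((pvTset topics ab.1).mpr h1T), ih,
          pvAdj_inner topics ab.1]
      simp only [hraw]
      constructor
      · rintro ((h | ⟨c, hc2, hcT, (⟨h1, h2⟩ | ⟨h1, h2⟩)⟩) | ⟨hxT, hyT, hr⟩)
        · exact Or.inl h
        · exact Or.inr ⟨h1 ▸ h1T, h2 ▸ hcT, Or.inl (Or.inl ⟨h1, h2 ▸ hc2⟩)⟩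
        · exact Or.inr ⟨h1 ▸ hcT, h2 ▸ h1T, Or.inr (Or.inl ⟨h2, h1 ▸ hc2⟩)⟩
        · exact Or.inr ⟨hxT, hyT, hr.elim (fun h' => Or.inl (Or.inr h')) (fun h' => Or.inr (Or.inr h'))⟩
      · rintro (h | ⟨hxT, hyT, (⟨h1, h2⟩ | h) | (⟨h1, h2⟩ | h)⟩)
        · exact Or.inl (Or.inl h)
        · exact Or.inl (Or.inr ⟨y, h2, hyT, Or.inl ⟨h1, rfl⟩⟩)
        · exact Or.inr ⟨hxT, hyT, Or.inl h⟩
        · exact Or.inl (Or.inr ⟨x, h2, hxT, Or.inr ⟨rfl, h1⟩⟩)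
        · exact Or.inr ⟨hxT, hyT, Or.inr h⟩
    · rw [if_neg (fun h => h1T ((pvTset topics ab.1).mp h)), ih]
      simp only [hraw]
      have hni : ∀ u : String, u = ab.1 → u ∈ topics → False := fun u h1 h2 => h1T (h1 ▸ h2)
      tauto

-- ---------- B's component closure ----------

theorem pvMem_nbrs (adj : PySem.Dict String (PySem.Set String)) :
    ∀ (comp acc : List String) (y : String),
      y ∈ comp.foldl (fun acc u => PySem.Set.union acc (adj.getD u PySem.Set.empty)) acc
      ↔ y ∈ acc ∨ ∃ u ∈ comp, y ∈ adj.getD u PySem.Set.empty := by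
  intro comp
  induction comp with
  | nil => intro acc y; simp
  | cons u us ih =>
    intro acc y
    rw [List.foldl_cons, ih, List.exists_mem_cons_iff, PySem.Set.mem_union]
    tauto

theorem pvUnion_append (s : PySem.Set String) :
    ∀ t : List String, ∃ r : List String, PySem.Set.union s t = s ++ r := by
  suffices h : ∀ (t : List String) (s : PySem.Set String), ∃ r, t.foldl PySem.Set.add s = s ++ r by
    intro t
    exact h t s
  intro t
  induction t with
  | nil => intro s; exact ⟨[], by simp⟩
  | cons x xs ih =>
    intro s
    obtain ⟨r, hr⟩ := ih (s.add x)
    rw [List.foldl_cons]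
    by_cases hx : s.contains x
    · refine ⟨r, ?_⟩
      rw [show s.add x = s from by rw [PySem.Set.add, if_pos hx]] at hr ⊢
      exact hr
    · refine ⟨[x] ++ r, ?_⟩
      rw [show s.add x = s ++ [x] from by rw [PySem.Set.add, if_neg hx]] at hr ⊢
      rw [List.append_assoc] at hr
      exact hr

-- the frontier-expansion loop computes exactly the reachable set
theorem pvClosure_spec (order : List String) (adj : PySem.Dict String (PySem.Set String))
    (E : String → String → Prop) (t : String)
    (hadj : ∀ u v, v ∈ adj.getD u PySem.Set.empty ↔ E u v)
    (hEmem : ∀ u v, E u v → v ∈ order) :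
    ∀ (f : Nat) (comp : PySem.Set String), comp.Nodup →
      (∀ x ∈ comp, Relation.ReflTransGen E t x) → t ∈ comp → (∀ x ∈ comp, x ∈ order) →
      order.length + 1 ≤ f + comp.length →
      ∀ x, x ∈ pvClosure f adj comp ↔ Relation.ReflTransGen E t x := by
  intro f
  induction f with
  | zero =>
    intro comp hnd hsound _ hsub hfuel
    exfalso
    have : comp.length ≤ order.length := (hnd.subperm (fun x hx => hsub x hx)).length_le
    omega
  | succ f ih =>
    intro comp hnd hsound htmem hsub hfuel
    rw [pvClosure]
    have hmem_nw : ∀ x, x ∈ PySem.Set.union comp (pvNbrs adj comp)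
        ↔ x ∈ comp ∨ ∃ u ∈ comp, E u x := by
      intro x
      rw [PySem.Set.mem_union, pvNbrs, pvMem_nbrs]
      simp only [hadj]
      tauto
    split
    · -- the loop breaks: comp is closed under E
      next hlen =>
      obtain ⟨r, hr⟩ := pvUnion_append comp (pvNbrs adj comp)
      have hr0 : r = [] := by
        have := congrArg List.length hr
        rw [List.length_append] at this
        have : r.length = 0 := by omega
        exact List.length_eq_zero_iff.mp this
      have hclosed : ∀ u ∈ comp, ∀ v, E u v → v ∈ comp := by
        intro u hu v hE
        have : v ∈ PySem.Set.union comp (pvNbrs adj comp) := (hmem_nw v).mpr (Or.inr ⟨u, hu, hE⟩)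
        rwa [hr, hr0, List.append_nil] at this
      intro x
      constructor
      · exact hsound x
      · intro hreach
        induction hreach with
        | refl => exact htmem
        | tail _ hE ihr => exact hclosed _ ihr _ hE
    · -- the frontier grew: recurse
      next hlen =>
      have hnd' : (PySem.Set.union comp (pvNbrs adj comp)).Nodup := PySem.Set.nodup_union _ _ hnd
      have hsound' : ∀ x ∈ PySem.Set.union comp (pvNbrs adj comp), Relation.ReflTransGen E t x := by
        intro x hx
        rcases (hmem_nw x).mp hx with h | ⟨u, hu, hE⟩
        · exact hsound x h
        · exact Relation.ReflTransGen.tail (hsound u hu) hE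
      have htmem' : t ∈ PySem.Set.union comp (pvNbrs adj comp) := (hmem_nw t).mpr (Or.inl htmem)
      have hsub' : ∀ x ∈ PySem.Set.union comp (pvNbrs adj comp), x ∈ order := by
        intro x hx
        rcases (hmem_nw x).mp hx with h | ⟨u, hu, hE⟩
        · exact hsub x h
        · exact hEmem u x hE
      have hfuel' : order.length + 1 ≤ f + (PySem.Set.union comp (pvNbrs adj comp)).length := by
        obtain ⟨r, hr⟩ := pvUnion_append comp (pvNbrs adj comp)
        have hge := congrArg List.length hr
        rw [List.length_append] at hge
        omega
      exact ih _ hnd' hsound' htmem' hsub' hfuel'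

-- ---------- B's main loop ----------

theorem pvLoopB (order : List String) (adj : PySem.Dict String (PySem.Set String))
    (ρ : String → String)
    (hcomp : ∀ t ∈ order, ∀ x, x ∈ pvClosure (order.length + 1) adj (PySem.Set.ofList [t]) ↔ ρ t = ρ x)
    (hρmem : ∀ t x, t ∈ order → ρ t = ρ x → x ∈ order) :
    ∀ (l : List String) (seen : PySem.Set String) (gs : List (List String)) (R : List String),
      (∀ x ∈ l, x ∈ order) → (∀ x, x ∈ seen ↔ x ∈ order ∧ ρ x ∈ R) →
      (l.foldl (fun (st : PySem.Set String × List (List String)) t =>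
          if st.1.contains t then st
          else
            (PySem.Set.union st.1 (pvClosure (order.length + 1) adj (PySem.Set.ofList [t])),
             st.2 ++ [PySem.Set.ofList (order.filter
               (fun x => (pvClosure (order.length + 1) adj (PySem.Set.ofList [t])).contains x))]))
        (seen, gs)).2
      = gs ++ (pvDedupFrom (l.map ρ) R).map
          (fun r => PySem.Set.ofList (order.filter (fun x => decide (ρ x = r)))) := by
  intro l
  induction l with
  | nil => intro seen gs R _ _; simp [pvDedupFrom]
  | cons t rest ih =>
    intro seen gs R hl hinv
    have htO : t ∈ order := hl t (List.mem_cons_self ..)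
    rw [List.foldl_cons, List.map_cons]
    dsimp only
    set comp := pvClosure (order.length + 1) adj (PySem.Set.ofList [t]) with hcompdef
    by_cases hseen : ρ t ∈ R
    · rw [show pvDedupFrom (ρ t :: rest.map ρ) R = pvDedupFrom (rest.map ρ) R from by
        rw [pvDedupFrom, if_pos hseen]]
      rw [show seen.contains t = true from List.contains_iff_mem.mpr ((hinv t).mpr ⟨htO, hseen⟩),
          if_pos rfl]
      exact ih seen gs R (fun x hx => hl x (List.mem_cons_of_mem _ hx)) hinv
    · have htns : t ∉ seen := fun hc => hseen ((hinv t).mp hc).2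
      rw [show seen.contains t = false from Bool.eq_false_iff.mpr
            (fun hc => htns (List.contains_iff_mem.mp hc)),
          if_neg (by simp)]
      rw [show pvDedupFrom (ρ t :: rest.map ρ) R = ρ t :: pvDedupFrom (rest.map ρ) (R ++ [ρ t]) from by
        rw [pvDedupFrom, if_neg hseen]]
      have hcontains : ∀ x : String, comp.contains x = decide (ρ x = ρ t) := by
        intro x
        by_cases hmem : x ∈ comp
        · have h1 : ρ x = ρ t := ((hcomp t htO x).mp hmem).symm
          simp [hmem, h1]
        · have h1 : ¬ ρ x = ρ t := fun hc => hmem ((hcomp t htO x).mpr hc.symm)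
          simp [hmem, h1]
      have hgrp : order.filter (fun x => comp.contains x)
          = order.filter (fun x => decide (ρ x = ρ t)) :=
        List.filter_congr (fun x _ => hcontains x)
      have hinv' : ∀ x, x ∈ PySem.Set.union seen comp ↔ x ∈ order ∧ ρ x ∈ R ++ [ρ t] := by
        intro x
        rw [PySem.Set.mem_union]
        constructor
        · rintro (hx | hx)
          · obtain ⟨h1, h2⟩ := (hinv x).mp hx
            exact ⟨h1, List.mem_append.mpr (Or.inl h2)⟩
          · have h1 := (hcomp t htO x).mp hx
            exact ⟨hρmem t x htO h1, List.mem_append.mpr (Or.inr (by rw [h1]; exact List.mem_singleton.mpr rfl))⟩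
        · rintro ⟨h1, h2⟩
          rcases List.mem_append.mp h2 with h3 | h3
          · exact Or.inl ((hinv x).mpr ⟨h1, h3⟩)
          · exact Or.inr ((hcomp t htO x).mpr (List.mem_singleton.mp h3).symm)
      rw [ih (PySem.Set.union seen comp)
          (gs ++ [PySem.Set.ofList (order.filter (fun x => comp.contains x))])
          (R ++ [ρ t]) (fun x hx => hl x (List.mem_cons_of_mem _ hx)) hinv']
      rw [hgrp, List.map_cons, List.append_assoc]
      rfl

-- ---------- assembling both sides ----------

theorem pvOfList_nodup (l : List String) (h : l.Nodup) : PySem.Set.ofList l = l := by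
  rw [show PySem.Set.ofList l = PySem.List.dedup l from rfl, pvDedup_eq]
  exact pvDedupFrom_self l [] h (fun x _ => by simp)

-- ===== VERDICT (by name: the statement is the Claim_ definition above) =====
theorem get_transitive_synonym_groups_spec : Claim_equal_get_transitive_synonym_groups := by
  intro topics ts _hdom
  unfold Spec_get_transitive_synonym_groups
  set flat := pvFlat topics (pvFullSyn topics ts).items with hflatdef
  set ρ := flat.foldl (fun ρ ab => pvMerge ρ ab.1 ab.2) id with hρdef
  set order := PySem.List.dedup topics with horderdef
  have hpairs : ∀ ab ∈ flat, ab.1 ∈ topics ∧ ab.2 ∈ topics := by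
    rintro ⟨a, b⟩ hab
    have := (mem_pvFlat topics (pvFullSyn topics ts).items a b).mp hab
    exact ⟨this.2.1, this.2.2⟩
  obtain ⟨hUFI, hMatch⟩ := pvFold_spec topics flat
    (topics.foldl (fun d t => d.insert t t) (PySem.Dict.mk [])) id []
    hpairs (pvUFI_parent0 topics) pvMatch_nil
  rw [List.nil_append] at hMatch
  -- the common root-equivalence
  have hE_iff : ∀ x y, ρ x = ρ y ↔ Relation.EqvGen (pvEdge topics ts) x y := by
    intro x y
    rw [hMatch x y]
    exact pvEqvGen_iff_of_iff (fun u v => pvFlatA_iff_edge topics ts u v) x y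
  have hrtg : ∀ x y, ρ x = ρ y ↔ Relation.ReflTransGen (pvEdge topics ts) x y :=
    fun x y => (hE_iff x y).trans (pvEqvGen_iff_rtg (pvEdge_symm topics ts) x y)
  have hEmem_order : ∀ u v, pvEdge topics ts u v → v ∈ order :=
    fun u v h => (PySem.List.mem_dedup topics v).mpr h.2.1
  -- A's value, in closed form
  have hA : get_transitive_synonym_groups topics ts
      = (pvDedupFrom (topics.map ρ) []).map
          (fun r => PySem.Set.ofList (topics.filter (fun u => decide (ρ u = r)))) := by
    unfold get_transitive_synonym_groups
    dsimp only
    rw [pvLoopA_eq_flat topics (fun p a b => pvUnionA (topics.length + 1) p a b)]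
    rw [pvGroupsLoop topics ρ topics (PySem.Dict.mk []) _ hUFI (fun t ht => ht)]
    rw [PySem.Dict.values, pvGroupFold_items ρ topics, List.map_map]
    exact List.map_congr_left (fun r _ => rfl)
  -- closure membership is root-equality
  have hcomp : ∀ t ∈ order, ∀ x,
      x ∈ pvClosure (order.length + 1) (pvAdj topics order ts) (PySem.Set.ofList [t]) ↔ ρ t = ρ x := by
    intro t ht x
    have hsingle : PySem.Set.ofList [t] = [t] := rfl
    rw [pvClosure_spec order (pvAdj topics order ts) (pvEdge topics ts) t
        (fun u v => by rw [horderdef] at *; exact pvAdj_mem topics ts u v)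
        hEmem_order (order.length + 1) (PySem.Set.ofList [t])
        (by rw [hsingle]; exact List.nodup_singleton t)
        (by rw [hsingle]; intro x hx; have hxt := List.mem_singleton.mp hx; subst hxt; exact Relation.ReflTransGen.refl)
        (by rw [hsingle]; exact List.mem_singleton.mpr rfl)
        (by rw [hsingle]; intro x hx; have hxt := List.mem_singleton.mp hx; subst hxt; exact ht)
        (by rw [hsingle]; simp) x]
    exact (hrtg t x).symm
  have hρmem : ∀ t x, t ∈ order → ρ t = ρ x → x ∈ order := by
    intro t x ht h
    have hr := (hrtg t x).mp h
    induction hr with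
    | refl => exact ht
    | tail _ hE _ => exact hEmem_order _ _ hE
  -- B's value, in closed form
  have hB : get_transitive_synonym_groups_alt topics ts
      = (pvDedupFrom (order.map ρ) []).map
          (fun r => PySem.Set.ofList (order.filter (fun x => decide (ρ x = r)))) := by
    unfold get_transitive_synonym_groups_alt
    dsimp only
    rw [pvLoopB order (pvAdj topics order ts) ρ hcomp hρmem order PySem.Set.empty [] []
        (fun x hx => hx) (fun x => by simp [PySem.Set.empty])]
    rw [List.nil_append]
  -- the two closed forms coincide
  rw [hA, hB]
  have hdd : pvDedupFrom (order.map ρ) [] = pvDedupFrom (topics.map ρ) [] := by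
    rw [horderdef, pvDedup_eq]
    exact pvDedupFrom_map ρ topics [] [] (fun x hx => by simp at hx)
  rw [hdd]
  apply List.map_congr_left
  intro r _
  have hfil : order.filter (fun x => decide (ρ x = r))
      = pvDedupFrom (topics.filter (fun x => decide (ρ x = r))) [] := by
    rw [horderdef, pvDedup_eq]
    exact pvDedupFrom_filter (fun x => decide (ρ x = r)) topics [] [] (fun _ _ => Iff.rfl)
  rw [hfil, show PySem.Set.ofList (topics.filter (fun u => decide (ρ u = r)))
      = PySem.List.dedup (topics.filter (fun u => decide (ρ u = r))) from rfl, pvDedup_eq]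
  rw [pvOfList_nodup _ (hfil ▸ (nodup_pvDedupFrom _ []))]
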